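-- pv_equiv track=rewrite | github.com/wilmurillo-ai/Design-Assistant | .skills/openclaw-skills/skills/huangfeixia0101/zf-novel-writer/tools/status.py | get_era_info
-- ===== SOURCE A (Python) =====
-- def get_era_info(chapter_num):
--     """根据章节号获取纪元信息"""
--     eras = [
--         (1, 500, "青铜期", "青铜"),
--         (501, 1000, "白银期", "白银"),
--         (1001, 1500, "黄金期", "黄金"),
--         (1501, 2000, "铂金期", "铂金"),
--         (2001, 2500, "钻石期", "钻石"),
--         (2501, 3000, "王者期", "王者"),
--         (3001, 3500, "至尊期", "至尊"),
--         (3501, 4000, "主宰期", "主宰"),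
--     ]
--
--     for start, end, name, level in eras:
--         if start <= chapter_num <= end:
--             return name, level
--
--     return "未知", "未知"
-- ===== SOURCE B (Python) =====
-- def get_era_info(chapter_num):
--     """根据章节号获取纪元信息 (computed index instead of a scan)"""
--     eras = [
--         ("青铜期", "青铜"), ("白银期", "白银"), ("黄金期", "黄金"), ("铂金期", "铂金"),
--         ("钻石期", "钻石"), ("王者期", "王者"), ("至尊期", "至尊"), ("主宰期", "主宰"),
--     ]
--     idx = int((chapter_num - 1) // 500)
--     if 0 <= idx < 8 and idx * 500 + 1 <= chapter_num <= idx * 500 + 500: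
--         return eras[idx]
--     return "未知", "未知"
-- ===== Notes on version B (the rewrite author's own statement) =====
-- stated objective: simpler
-- what changed: Replaces the linear scan over (start,end) ranges by a direct arithmetic block index into a list of (name,level) pairs, with a single bound check.
import Mathlib
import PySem

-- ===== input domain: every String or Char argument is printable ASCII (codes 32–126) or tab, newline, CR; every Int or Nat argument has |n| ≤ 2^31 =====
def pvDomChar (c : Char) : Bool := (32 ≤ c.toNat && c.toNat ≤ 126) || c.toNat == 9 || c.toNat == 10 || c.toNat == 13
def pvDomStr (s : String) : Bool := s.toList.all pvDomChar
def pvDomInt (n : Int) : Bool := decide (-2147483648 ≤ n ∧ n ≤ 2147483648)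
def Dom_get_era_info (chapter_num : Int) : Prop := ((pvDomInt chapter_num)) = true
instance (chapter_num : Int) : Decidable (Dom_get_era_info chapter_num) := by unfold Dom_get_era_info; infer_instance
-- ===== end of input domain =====

-- B replaces A's linear scan over (start,end) ranges by a direct arithmetic index with one bound check (objective: simpler).

-- ===== PORT A =====
-- A's literal eras table
def pvErasA : List (Int × Int × String × String) :=
  [ (1, 500, "青铜期", "青铜"), (501, 1000, "白银期", "白银"),
    (1001, 1500, "黄金期", "黄金"), (1501, 2000, "铂金期", "铂金"),
    (2001, 2500, "钻石期", "钻石"), (2501, 3000, "王者期", "王者"),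
    (3001, 3500, "至尊期", "至尊"), (3501, 4000, "主宰期", "主宰") ]

-- A's for-loop with early return
def pvEraLoop (c : Int) : List (Int × Int × String × String) → String × String
  | [] => ("未知", "未知")
  | (s, e, name, level) :: rest =>
      if s ≤ c ∧ c ≤ e then (name, level) else pvEraLoop c rest

def get_era_info (chapter_num : Int) : String × String :=
  pvEraLoop chapter_num pvErasA

-- ===== PORT B =====
def pvErasB : List (String × String) :=
  [ ("青铜期", "青铜"), ("白银期", "白银"), ("黄金期", "黄金"), ("铂金期", "铂金"),
    ("钻石期", "钻石"), ("王者期", "王者"), ("至尊期", "至尊"), ("主宰期", "主宰") ]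

def get_era_info_alt (chapter_num : Int) : String × String :=
  let idx := PySem.Int.floordiv (chapter_num - 1) 500
  if 0 ≤ idx ∧ idx < 8 ∧ idx * 500 + 1 ≤ chapter_num ∧ chapter_num ≤ idx * 500 + 500 then
    (PySem.List.pyGet? pvErasB idx).getD ("未知", "未知")  -- index in range by the guard
  else ("未知", "未知")

-- ===== PRECONDITION & SPEC =====
def Spec_get_era_info (chapter_num : Int) (out : String × String) : Prop := out = get_era_info_alt chapter_num
instance (chapter_num : Int) (out : String × String) : Decidable (Spec_get_era_info chapter_num out) := by unfold Spec_get_era_info; infer_instance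

-- ===== CLAIM (what is proved, stated in full; the proofs are below) =====
def Claim_equal_get_era_info : Prop := ∀ (chapter_num : Int), Dom_get_era_info chapter_num → Spec_get_era_info chapter_num (get_era_info chapter_num)

-- ===== LEMMAS AND PROOFS =====
set_option maxHeartbeats 1000000 in

-- ===== VERDICT (by name: the statement is the Claim_ definition above) =====
theorem get_era_info_spec : Claim_equal_get_era_info := by
  intro c _
  unfold Spec_get_era_info get_era_info
  have hfd : PySem.Int.floordiv (c - 1) 500 = (c - 1) / 500 :=
    PySem.Int.floordiv_eq_ediv_of_pos (by norm_num)
  simp only [get_era_info_alt, hfd]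
  have hcase : (c - 1) / 500 = 0 ∨ (c - 1) / 500 = 1 ∨ (c - 1) / 500 = 2 ∨ (c - 1) / 500 = 3 ∨
      (c - 1) / 500 = 4 ∨ (c - 1) / 500 = 5 ∨ (c - 1) / 500 = 6 ∨ (c - 1) / 500 = 7 ∨
      (c - 1) / 500 < 0 ∨ 8 ≤ (c - 1) / 500 := by omega
  rcases hcase with hk | hk | hk | hk | hk | hk | hk | hk | hk | hk <;>
    first
      | (rw [hk]; simp only [pvEraLoop, pvErasA]; split_ifs <;> first | rfl | decide | omega)
      | (simp only [pvEraLoop, pvErasA]; split_ifs <;> first | rfl | omega)
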